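-- pv_equiv track=rewrite | github.com/yingshaoxo/yppm | yppm/resources/webpage_chat_application/super_completor.py | get_next_text_by_first_data_first
-- ===== SOURCE A (Python) =====
-- def get_next_text_by_first_data_first(source_text_lines_list, input_text, how_many_lines_you_want=300):
--     # Could make a micro_controller version by handle line pointer in file reader. So it would work for small memory devices
--     length = len(source_text_lines_list)
--
--     for right_side_index in range(len(input_text)):
--         right_side_sub_string = input_text[right_side_index:]
--
--         index = 0
--         while index < length:
--             line1 = source_text_lines_list[index]
--             line2 = source_text_lines_list[index+1]
--             current_text = line1 + "\n" + line2
--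
--             if (right_side_sub_string != "") and (right_side_sub_string in current_text):
--                 target_text = right_side_sub_string.join(current_text.split(right_side_sub_string)[1:])
--                 target_text += "\n".join(source_text_lines_list[index+2:index+2+how_many_lines_you_want])
--                 return target_text
--
--             index += 1
--             if (index + 1) >= length:
--                 break
--     return ""
-- ===== SOURCE B (Python) =====
-- def get_next_text_by_first_data_first(source_text_lines_list, input_text, how_many_lines_you_want=300):
--     lines = source_text_lines_list
--     pairs = [a + "\n" + b for a, b in zip(lines, lines[1:])]
--
--     def present(start):
--         sub = input_text[start:]
--         return any(sub in p for p in pairs)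
--
--     n = len(input_text)
--     if n == 0 or not present(n - 1):
--         return ""
--     # presence is monotone in the suffix start, so binary search the smallest start
--     lo, hi = 0, n - 1
--     while lo < hi:
--         mid = (lo + hi) // 2
--         if present(mid):
--             hi = mid
--         else:
--             lo = mid + 1
--     sub = input_text[lo:]
--     for index, pair in enumerate(pairs):
--         if sub in pair:
--             head = sub.join(pair.split(sub)[1:])
--             tail = "\n".join(lines[index + 2 : index + 2 + how_many_lines_you_want])
--             return head + tail
--     return ""
-- ===== Notes on version B (the rewrite author's own statement) =====
-- stated objective: faster
-- what changed: B precomputes the line-pair list once, binary-searches the smallest suffix start whose suffix occurs in some pair (presence is monotone in the start), and then does a single scan of the pairs, instead of A's linear outer loop over all suffix starts with a full inner rescan of the lines for each.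
import Mathlib
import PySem

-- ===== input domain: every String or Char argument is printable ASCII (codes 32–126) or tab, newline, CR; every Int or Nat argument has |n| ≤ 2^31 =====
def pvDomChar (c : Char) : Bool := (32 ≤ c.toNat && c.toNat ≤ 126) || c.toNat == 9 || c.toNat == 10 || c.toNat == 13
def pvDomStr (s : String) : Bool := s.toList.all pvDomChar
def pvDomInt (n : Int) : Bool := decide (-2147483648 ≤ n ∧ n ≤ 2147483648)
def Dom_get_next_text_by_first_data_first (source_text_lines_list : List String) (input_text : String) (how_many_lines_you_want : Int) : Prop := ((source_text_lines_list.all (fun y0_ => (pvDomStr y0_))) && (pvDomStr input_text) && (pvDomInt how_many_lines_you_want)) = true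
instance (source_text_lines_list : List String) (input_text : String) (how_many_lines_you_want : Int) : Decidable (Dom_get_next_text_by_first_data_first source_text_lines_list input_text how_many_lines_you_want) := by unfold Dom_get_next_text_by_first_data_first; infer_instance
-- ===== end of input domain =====

-- B replaces A's outer linear scan over suffix starts by a binary search over the (monotone)
-- presence of the suffix in the precomputed line-pair list, then a single scan of the pairs.

-- ===== PORT A =====
-- the inner `while index < length` loop; `some t` = the `return target_text`, `none` = loop ended
def pvA_inner (lines : List String) (sub : String) (how : Int) (length : Nat) (index : Nat) : Option String :=
  if _h : index < length then
    let line1 := (PySem.List.pyGet? lines (index : Int)).getD ""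
    -- lines[index+1] raises IndexError exactly when length = 1 (excluded by Pre_)
    let line2 := (PySem.List.pyGet? lines ((index : Int) + 1)).getD ""
    let current := line1 ++ "\n" ++ line2
    if sub ≠ "" ∧ PySem.Str.isIn sub current = true then
      some (PySem.Str.join sub (PySem.List.slice ((PySem.Str.split? current sub).getD []) (some 1) none) ++
            PySem.Str.join "\n" (PySem.List.slice lines (some ((index : Int) + 2)) (some ((index : Int) + 2 + how))))
    else
      let index' := index + 1
      if length ≤ index' + 1 then none
      else pvA_inner lines sub how length index'
  else none
termination_by length - index
decreasing_by omega

-- the outer `for right_side_index in range(len(input_text))` loop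
def pvA_outer (lines : List String) (input : String) (how : Int) (ri : Nat) : String :=
  if _h : ri < PySem.Str.len input then
    let sub := PySem.Str.slice input (some (ri : Int)) none
    match pvA_inner lines sub how lines.length 0 with
    | some t => t
    | none => pvA_outer lines input how (ri + 1)
  else ""
termination_by input.toList.length - ri
decreasing_by simp only [PySem.Str.len_eq] at _h; omega

def get_next_text_by_first_data_first (source_text_lines_list : List String) (input_text : String) (how_many_lines_you_want : Int) : String :=
  pvA_outer source_text_lines_list input_text how_many_lines_you_want 0

-- ===== PORT B =====
-- pairs = [a + "\n" + b for a, b in zip(lines, lines[1:])]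
def pvPairs (lines : List String) : List String :=
  (lines.zip (PySem.List.slice lines (some 1) none)).map (fun ab => ab.1 ++ "\n" ++ ab.2)

-- present(start) = any(input_text[start:] in p for p in pairs)
def pvB_present (pairs : List String) (input : String) (start : Int) : Bool :=
  pairs.any (fun p => PySem.Str.isIn (PySem.Str.slice input (some start) none) p)

-- the `while lo < hi` binary-search loop
def pvB_bsearch (pairs : List String) (input : String) (lo hi : Int) : Int :=
  if _h : lo < hi then
    let mid := PySem.Int.floordiv (lo + hi) 2
    if pvB_present pairs input mid then pvB_bsearch pairs input lo mid
    else pvB_bsearch pairs input (mid + 1) hi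
  else lo
termination_by (hi - lo).toNat
decreasing_by
  · have h2 : PySem.Int.floordiv (lo + hi) 2 < hi := by
      rw [PySem.Int.floordiv_lt_iff_lt_mul (by norm_num)]; omega
    omega
  · have h2 : lo ≤ PySem.Int.floordiv (lo + hi) 2 := (PySem.Int.floordiv_two_mid_bounds (le_of_lt _h)).1
    omega

-- the final `for index, pair in enumerate(pairs)` scan
def pvB_scan (lines : List String) (sub : String) (how : Int) : List (Int × String) → String
  | [] => ""
  | (index, pair) :: rest =>
    if PySem.Str.isIn sub pair then
      PySem.Str.join sub (PySem.List.slice ((PySem.Str.split? pair sub).getD []) (some 1) none) ++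
      PySem.Str.join "\n" (PySem.List.slice lines (some (index + 2)) (some (index + 2 + how)))
    else pvB_scan lines sub how rest

def get_next_text_by_first_data_first_alt (source_text_lines_list : List String) (input_text : String) (how_many_lines_you_want : Int) : String :=
  let pairs := pvPairs source_text_lines_list
  let n := PySem.Str.len input_text
  if n = 0 ∨ pvB_present pairs input_text ((n : Int) - 1) = false then ""
  else
    let lo := pvB_bsearch pairs input_text 0 ((n : Int) - 1)
    pvB_scan source_text_lines_list (PySem.Str.slice input_text (some lo) none) how_many_lines_you_want
      (PySem.List.enumerate pairs 0)

-- ===== PRECONDITION & SPEC =====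
-- Pre_ excludes exactly the inputs where A raises IndexError: a single source line with nonempty input_text
-- (the inner loop then reads source_text_lines_list[1]).
def Pre_get_next_text_by_first_data_first (source_text_lines_list : List String) (input_text : String) (how_many_lines_you_want : Int) : Prop :=
  source_text_lines_list.length = 1 → input_text = ""
instance (source_text_lines_list : List String) (input_text : String) (how_many_lines_you_want : Int) : Decidable (Pre_get_next_text_by_first_data_first source_text_lines_list input_text how_many_lines_you_want) := by unfold Pre_get_next_text_by_first_data_first; infer_instance

def pvWitness_get_next_text_by_first_data_first : List String × String × Int := (["hello", "world", "next"], "lo", 300)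

def Spec_get_next_text_by_first_data_first (source_text_lines_list : List String) (input_text : String) (how_many_lines_you_want : Int) (out : String) : Prop := out = get_next_text_by_first_data_first_alt source_text_lines_list input_text how_many_lines_you_want
instance (source_text_lines_list : List String) (input_text : String) (how_many_lines_you_want : Int) (out : String) : Decidable (Spec_get_next_text_by_first_data_first source_text_lines_list input_text how_many_lines_you_want out) := by unfold Spec_get_next_text_by_first_data_first; infer_instance

-- ===== CLAIM (what is proved, stated in full; the proofs are below) =====
def Claim_equal_get_next_text_by_first_data_first : Prop := ∀ (source_text_lines_list : List String) (input_text : String) (how_many_lines_you_want : Int), Dom_get_next_text_by_first_data_first source_text_lines_list input_text how_many_lines_you_want → Pre_get_next_text_by_first_data_first source_text_lines_list input_text how_many_lines_you_want → Spec_get_next_text_by_first_data_first source_text_lines_list input_text how_many_lines_you_want (get_next_text_by_first_data_first source_text_lines_list input_text how_many_lines_you_want)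


-- ===== LEMMAS AND PROOFS =====

-- Option-valued version of B's final scan (`none` = the scan falls through)
def pvScanO (lines : List String) (sub : String) (how : Int) : List (Int × String) → Option String
  | [] => none
  | (index, pair) :: rest =>
    if PySem.Str.isIn sub pair then
      some (PySem.Str.join sub (PySem.List.slice ((PySem.Str.split? pair sub).getD []) (some 1) none) ++
            PySem.Str.join "\n" (PySem.List.slice lines (some (index + 2)) (some (index + 2 + how))))
    else pvScanO lines sub how rest

theorem pvB_scan_eq_scanO (lines : List String) (sub : String) (how : Int) (l : List (Int × String)) :
    pvB_scan lines sub how l = (pvScanO lines sub how l).getD "" := by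
  induction l with
  | nil => rfl
  | cons hd tl ih =>
    obtain ⟨i, p⟩ := hd
    simp only [pvB_scan, pvScanO]
    split
    · rfl
    · exact ih

theorem pvScanO_eq_none_iff (lines : List String) (sub : String) (how : Int) (l : List String) (s : Int) :
    pvScanO lines sub how (PySem.List.enumerate l s) = none ↔ l.any (fun p => PySem.Str.isIn sub p) = false := by
  induction l generalizing s with
  | nil => simp [pvScanO, PySem.List.enumerate_nil]
  | cons hd tl ih =>
    rw [PySem.List.enumerate_cons]
    simp only [pvScanO, List.any_cons]
    split
    · simp_all
    · simp_all

theorem pvPairs_length (lines : List String) : (pvPairs lines).length = lines.length - 1 := by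
  simp [pvPairs, PySem.List.slice_from_one]

theorem pvPairs_getElem (lines : List String) (i : Nat) (h : i + 1 < lines.length) :
    (pvPairs lines)[i]'(by rw [pvPairs_length]; omega) =
      lines[i]'(by omega) ++ "\n" ++ lines[i+1]'h := by
  simp only [pvPairs, PySem.List.slice_from_one, List.getElem_map, List.getElem_zip,
    List.getElem_tail]

-- sub nonempty when the start is inside the string
theorem pvSub_toList (input : String) (ri : Nat) :
    (PySem.Str.slice input (some (ri : Int)) none).toList = input.toList.drop ri := by
  simp [pysem, PySem.List.slice_from_natCast]

theorem pvSub_ne_empty (input : String) (ri : Nat) (h : ri < input.toList.length) :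
    PySem.Str.slice input (some (ri : Int)) none ≠ "" := by
  intro he
  have := congrArg String.toList he
  rw [pvSub_toList] at this
  simp only [String.toList_empty, List.drop_eq_nil_iff] at this
  omega

-- presence is monotone in the suffix start
theorem pvPresent_mono (pairs : List String) (input : String) (s t : Int) (h0 : 0 ≤ s) (hst : s ≤ t)
    (h : pvB_present pairs input s = true) : pvB_present pairs input t = true := by
  unfold pvB_present at *
  rw [List.any_eq_true] at h ⊢
  obtain ⟨p, hp, hin⟩ := h
  refine ⟨p, hp, ?_⟩
  rw [PySem.Str.isIn_iff_infix] at hin ⊢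
  have hs : (PySem.Str.slice input (some s) none).toList = input.toList.drop s.toNat := by
    simp [pysem, PySem.List.slice_from _ h0]
  have ht : (PySem.Str.slice input (some t) none).toList = input.toList.drop t.toNat := by
    simp [pysem, PySem.List.slice_from _ (le_trans h0 hst)]
  rw [hs] at hin
  rw [ht]
  have hdd : input.toList.drop t.toNat = (input.toList.drop s.toNat).drop (t.toNat - s.toNat) := by
    rw [List.drop_drop]
    congr 1
    omega
  rw [hdd]
  exact (List.drop_suffix _ _).isInfix.trans hin

theorem pvA_inner_eq_scanO_aux (lines : List String) (sub : String) (how : Int) (hsub : sub ≠ "") :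
    ∀ (k i : Nat), lines.length - i ≤ k → i + 1 < lines.length →
    pvA_inner lines sub how lines.length i =
      pvScanO lines sub how ((PySem.List.enumerate (pvPairs lines) 0).drop i) := by
  intro k
  induction k with
  | zero => intro i hk hi; omega
  | succ k ih =>
    intro i hk hi
    have hilt : i < lines.length := by omega
    have hpl : i < (pvPairs lines).length := by rw [pvPairs_length]; omega
    have hel : i < (PySem.List.enumerate (pvPairs lines) 0).length := by
      rw [PySem.List.length_enumerate]; exact hpl
    have h2 : ((i : Int) + 1) = ((i + 1 : Nat) : Int) := by push_cast; ring
    have hcur : ((PySem.List.pyGet? lines (i : Int)).getD "" ++ "\n" ++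
        (PySem.List.pyGet? lines ((i : Int) + 1)).getD "") = (pvPairs lines)[i]'hpl := by
      rw [pvPairs_getElem lines i hi, h2, PySem.List.pyGet?_natCast, PySem.List.pyGet?_natCast,
        List.getElem?_eq_getElem hilt, List.getElem?_eq_getElem hi]
      rfl
    rw [pvA_inner, dif_pos hilt]
    rw [List.drop_eq_getElem_cons hel, PySem.List.getElem_enumerate]
    simp only [pvScanO, hcur, zero_add]
    by_cases hin : PySem.Str.isIn sub ((pvPairs lines)[i]'hpl) = true
    · rw [if_pos ⟨hsub, hin⟩, if_pos hin]
    · rw [if_neg hin, if_neg (show ¬(sub ≠ "" ∧ PySem.Str.isIn sub ((pvPairs lines)[i]'hpl) = true) by tauto)]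
      by_cases hbrk : lines.length ≤ i + 1 + 1
      · rw [if_pos hbrk]
        have : (PySem.List.enumerate (pvPairs lines) 0).drop (i + 1) = [] := by
          apply List.drop_eq_nil_of_le
          rw [PySem.List.length_enumerate, pvPairs_length]
          omega
        rw [this, pvScanO]
      · rw [if_neg hbrk]
        exact ih (i + 1) (by omega) (by omega)

-- A's inner while-loop is B's scan of the enumerated pair list
theorem pvA_inner_eq_scanO (lines : List String) (sub : String) (how : Int)
    (hsub : sub ≠ "") (hlen : lines.length ≠ 1) :
    pvA_inner lines sub how lines.length 0 =
      pvScanO lines sub how (PySem.List.enumerate (pvPairs lines) 0) := by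
  rcases Nat.lt_or_ge lines.length 2 with h2 | h2
  · interval_cases h : lines.length
    · have : lines = [] := List.length_eq_zero_iff.mp h
      subst this
      rw [pvA_inner]
      simp [pvPairs, PySem.List.enumerate_nil, pvScanO]
    · omega
  · have := pvA_inner_eq_scanO_aux lines sub how hsub lines.length 0 (by omega) (by omega)
    simpa using this

theorem pvB_bsearch_min_aux (pairs : List String) (input : String) :
    ∀ (k : Nat) (lo hi : Int), (hi - lo).toNat ≤ k → 0 ≤ lo → lo ≤ hi →
    pvB_present pairs input hi = true →
    (∀ s : Int, 0 ≤ s → s < lo → pvB_present pairs input s = false) →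
    lo ≤ pvB_bsearch pairs input lo hi ∧ pvB_bsearch pairs input lo hi ≤ hi ∧
      pvB_present pairs input (pvB_bsearch pairs input lo hi) = true ∧
      ∀ s : Int, 0 ≤ s → s < pvB_bsearch pairs input lo hi → pvB_present pairs input s = false := by
  intro k
  induction k with
  | zero =>
    intro lo hi hk h0 hle hhi hlow
    have heq : lo = hi := by omega
    subst heq
    rw [pvB_bsearch, dif_neg (by omega)]
    exact ⟨le_refl _, le_refl _, hhi, hlow⟩
  | succ k ih =>
    intro lo hi hk h0 hle hhi hlow
    by_cases hlt : lo < hi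
    · rw [pvB_bsearch]
      simp only [dif_pos hlt]
      have hmb := PySem.Int.floordiv_two_mid_bounds hle
      have hmlt : PySem.Int.floordiv (lo + hi) 2 < hi := by
        rw [PySem.Int.floordiv_lt_iff_lt_mul (by norm_num)]; omega
      by_cases hp : pvB_present pairs input (PySem.Int.floordiv (lo + hi) 2) = true
      · rw [if_pos hp]
        have h := ih lo _ (by omega) h0 (by omega) hp hlow
        exact ⟨h.1, by omega, h.2.2.1, h.2.2.2⟩
      · rw [if_neg hp]
        have hlow' : ∀ s : Int, 0 ≤ s → s < PySem.Int.floordiv (lo + hi) 2 + 1 →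
            pvB_present pairs input s = false := by
          intro s hs hsm
          by_cases hsl : s < lo
          · exact hlow s hs hsl
          · by_contra hc
            rw [Bool.not_eq_false] at hc
            exact hp (pvPresent_mono pairs input s _ hs (by omega) hc)
        have h := ih _ hi (by omega) (by omega) (by omega) hhi hlow'
        exact ⟨by omega, h.2.1, h.2.2.1, h.2.2.2⟩
    · have heq : lo = hi := by omega
      subst heq
      rw [pvB_bsearch, dif_neg (by omega)]
      exact ⟨le_refl _, le_refl _, hhi, hlow⟩

-- binary search returns the least start whose suffix is present
theorem pvB_bsearch_min (pairs : List String) (input : String) (lo hi : Int)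
    (h0 : 0 ≤ lo) (hle : lo ≤ hi) (hhi : pvB_present pairs input hi = true)
    (hlow : ∀ s : Int, 0 ≤ s → s < lo → pvB_present pairs input s = false) :
    lo ≤ pvB_bsearch pairs input lo hi ∧ pvB_bsearch pairs input lo hi ≤ hi ∧
      pvB_present pairs input (pvB_bsearch pairs input lo hi) = true ∧
      ∀ s : Int, 0 ≤ s → s < pvB_bsearch pairs input lo hi → pvB_present pairs input s = false :=
  pvB_bsearch_min_aux pairs input (hi - lo).toNat lo hi (le_refl _) h0 hle hhi hlow

-- A's outer loop, when nothing is present, returns ""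
theorem pvA_outer_none_aux (lines : List String) (input : String) (how : Int)
    (hlen : lines.length ≠ 1)
    (hnone : pvB_present (pvPairs lines) input ((input.toList.length : Int) - 1) = false) :
    ∀ (k ri : Nat), input.toList.length - ri ≤ k → pvA_outer lines input how ri = "" := by
  intro k
  induction k with
  | zero =>
    intro ri hk
    rw [pvA_outer, dif_neg (by simp only [PySem.Str.len_eq]; omega)]
  | succ k ih =>
    intro ri hk
    by_cases hlt : ri < input.toList.length
    · rw [pvA_outer]
      simp only [dif_pos (show ri < PySem.Str.len input by simp only [PySem.Str.len_eq]; omega)]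
      have hsub := pvSub_ne_empty input ri hlt
      have hpres : pvB_present (pvPairs lines) input (ri : Int) = false := by
        by_contra hc
        rw [Bool.not_eq_false] at hc
        have := pvPresent_mono (pvPairs lines) input (ri : Int)
          ((input.toList.length : Int) - 1) (by omega) (by omega) hc
        rw [this] at hnone
        simp at hnone
      have hscan : pvScanO lines (PySem.Str.slice input (some (ri : Int)) none) how
          (PySem.List.enumerate (pvPairs lines) 0) = none := by
        rw [pvScanO_eq_none_iff]
        exact hpres
      rw [pvA_inner_eq_scanO lines _ how hsub hlen, hscan]
      exact ih (ri + 1) (by omega)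
    · rw [pvA_outer, dif_neg (by simp only [PySem.Str.len_eq]; omega)]

theorem pvA_outer_none (lines : List String) (input : String) (how : Int)
    (hlen : lines.length ≠ 1)
    (hnone : pvB_present (pvPairs lines) input ((input.toList.length : Int) - 1) = false) :
    ∀ ri : Nat, pvA_outer lines input how ri = "" := fun ri =>
  pvA_outer_none_aux lines input how hlen hnone (input.toList.length - ri) ri (le_refl _)

-- A's outer loop, at the least present start, returns B's scan result
theorem pvA_outer_at_lo (lines : List String) (input : String) (how : Int) (lo : Int)
    (hlen : lines.length ≠ 1) (_h0 : 0 ≤ lo) (hlt : lo < (input.toList.length : Int))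
    (hlo : pvB_present (pvPairs lines) input lo = true)
    (ri : Nat) (heq : (ri : Int) = lo) :
    pvA_outer lines input how ri =
      pvB_scan lines (PySem.Str.slice input (some lo) none) how
        (PySem.List.enumerate (pvPairs lines) 0) := by
  rw [pvA_outer]
  simp only [dif_pos (show ri < PySem.Str.len input by simp only [PySem.Str.len_eq]; omega)]
  have hsub := pvSub_ne_empty input ri (by omega)
  rw [pvA_inner_eq_scanO lines _ how hsub hlen, heq]
  rw [pvB_scan_eq_scanO]
  have hne : pvScanO lines (PySem.Str.slice input (some lo) none) how
      (PySem.List.enumerate (pvPairs lines) 0) ≠ none := by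
    intro hc
    rw [pvScanO_eq_none_iff] at hc
    rw [show (pvB_present (pvPairs lines) input lo) =
      ((pvPairs lines).any fun p => PySem.Str.isIn (PySem.Str.slice input (some lo) none) p) from rfl,
      hc] at hlo
    exact Bool.false_ne_true hlo
  obtain ⟨v, hv⟩ := Option.ne_none_iff_exists'.mp hne
  rw [hv]
  rfl

-- A's outer loop reaches the least present start and returns B's scan result there
theorem pvA_outer_hit_aux (lines : List String) (input : String) (how : Int) (lo : Int)
    (hlen : lines.length ≠ 1) (h0 : 0 ≤ lo) (hlt : lo < (input.toList.length : Int))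
    (hlo : pvB_present (pvPairs lines) input lo = true)
    (hmin : ∀ s : Int, 0 ≤ s → s < lo → pvB_present (pvPairs lines) input s = false) :
    ∀ (k ri : Nat), lo.toNat - ri ≤ k → (ri : Int) ≤ lo →
      pvA_outer lines input how ri =
        pvB_scan lines (PySem.Str.slice input (some lo) none) how
          (PySem.List.enumerate (pvPairs lines) 0) := by
  intro k
  induction k with
  | zero =>
    intro ri hk hri
    exact pvA_outer_at_lo lines input how lo hlen h0 hlt hlo ri (by omega)
  | succ k ih =>
    intro ri hk hri
    by_cases hstop : (ri : Int) = lo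
    · exact pvA_outer_at_lo lines input how lo hlen h0 hlt hlo ri hstop
    · rw [pvA_outer]
      simp only [dif_pos (show ri < PySem.Str.len input by simp only [PySem.Str.len_eq]; omega)]
      have hsub := pvSub_ne_empty input ri (by omega)
      have hpres : pvB_present (pvPairs lines) input (ri : Int) = false :=
        hmin _ (by omega) (by omega)
      have hscan : pvScanO lines (PySem.Str.slice input (some (ri : Int)) none) how
          (PySem.List.enumerate (pvPairs lines) 0) = none := by
        rw [pvScanO_eq_none_iff]
        exact hpres
      rw [pvA_inner_eq_scanO lines _ how hsub hlen, hscan]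
      exact ih (ri + 1) (by omega) (by omega)

-- ===== VERDICT (by name: the statement is the Claim_ definition above) =====
theorem get_next_text_by_first_data_first_spec : Claim_equal_get_next_text_by_first_data_first := by
  intro lines input how _hdom hpre
  unfold Spec_get_next_text_by_first_data_first
  unfold get_next_text_by_first_data_first get_next_text_by_first_data_first_alt
  simp only [PySem.Str.len_eq]
  by_cases hn : input.toList.length = 0
  · rw [if_pos (Or.inl (by omega)), pvA_outer, dif_neg (by simp only [PySem.Str.len_eq]; omega)]
  · have hlen : lines.length ≠ 1 := by
      intro h1
      have he : input = "" := hpre h1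
      subst he
      simp at hn
    by_cases hp : pvB_present (pvPairs lines) input ((input.toList.length : Int) - 1) = false
    · rw [if_pos (Or.inr hp)]
      exact pvA_outer_none lines input how hlen hp 0
    · rw [if_neg (by rw [not_or]; exact ⟨by omega, hp⟩)]
      rw [Bool.not_eq_false] at hp
      obtain ⟨h1, h2, h3, h4⟩ := pvB_bsearch_min (pvPairs lines) input 0
        ((input.toList.length : Int) - 1) (le_refl _) (by omega) hp
        (fun s hs hcon => absurd hcon (by omega))
      exact pvA_outer_hit_aux lines input how _ hlen h1 (by omega) h3 h4
        (pvB_bsearch (pvPairs lines) input 0 ((input.toList.length : Int) - 1)).toNat 0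
        (by omega) (by omega)
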